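-- pv_equiv track=rewrite | github.com/Tadynas/Python | Collections/dictionaries.py | most_courses
-- ===== SOURCE A (Python) =====
-- def most_courses(teacher):
--     most_courses_teacher = ""
--     max_courses = -1
--     for teach, course_list in teacher.items():
--         if(len(course_list) > max_courses):
--             max_courses = len(course_list)
--             most_courses_teacher = teach
--     return most_courses_teacher
-- ===== SOURCE B (Python) =====
-- def most_courses(teacher):
--     if not teacher:
--         return ""
--     ranking = sorted(teacher.items(), key=lambda kv: -len(kv[1]))
--     return ranking[0][0]
-- ===== Notes on version B (the rewrite author's own statement) =====
-- stated objective: alternative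
-- what changed: Replaces the running-max scan with a guard for the empty dict plus a stable sort of the items by descending course count, returning the top-ranked teacher (stability preserves first-wins ties).
import Mathlib
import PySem

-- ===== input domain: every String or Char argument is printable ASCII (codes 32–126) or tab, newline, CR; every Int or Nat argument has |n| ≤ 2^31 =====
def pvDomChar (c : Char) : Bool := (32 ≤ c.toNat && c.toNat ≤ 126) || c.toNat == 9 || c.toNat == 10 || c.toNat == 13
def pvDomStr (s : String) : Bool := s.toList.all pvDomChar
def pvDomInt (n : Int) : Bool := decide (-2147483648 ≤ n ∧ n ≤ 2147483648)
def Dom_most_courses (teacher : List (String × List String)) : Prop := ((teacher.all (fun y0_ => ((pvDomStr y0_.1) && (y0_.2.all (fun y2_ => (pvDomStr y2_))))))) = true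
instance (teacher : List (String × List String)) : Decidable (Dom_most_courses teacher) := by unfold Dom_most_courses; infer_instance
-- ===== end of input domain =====

-- B replaces A's running-max scan by a stable sort of the items on descending course count (alternative decomposition, not faster).

-- ===== PORT A =====
-- running-max scan: state (most_courses_teacher, max_courses)
def most_courses (teacher : List (String × List String)) : String :=
  (teacher.foldl
    (fun (st : String × Int) kv =>
      if (kv.2.length : Int) > st.2 then (kv.1, (kv.2.length : Int)) else st)
    ("", -1)).1

-- ===== PORT B =====
def most_courses_alt (teacher : List (String × List String)) : String :=
  if teacher = [] then ""
  else
    (PySem.List.sorted teacher (fun kv => -((kv.2.length : Int))) false).headI.1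

-- ===== PRECONDITION & SPEC =====
def Spec_most_courses (teacher : List (String × List String)) (out : String) : Prop := out = most_courses_alt teacher
instance (teacher : List (String × List String)) (out : String) : Decidable (Spec_most_courses teacher out) := by unfold Spec_most_courses; infer_instance

-- ===== CLAIM (what is proved, stated in full; the proofs are below) =====
def Claim_equal_most_courses : Prop := ∀ (teacher : List (String × List String)), Dom_most_courses teacher → Spec_most_courses teacher (most_courses teacher)

-- ===== LEMMAS AND PROOFS =====

-- Loop invariant: running the scan from a state mirroring the head of the
-- insertion-sorted accumulator keeps mirroring it.
theorem pv_loop_inv (xs : List (String × List String)) :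
    ∀ (acc : List (String × List String)) (s : String × Int),
      acc ≠ [] → s.1 = acc.headI.1 → s.2 = (acc.headI.2.length : Int) →
      (List.foldl
        (fun acc x =>
          PySem.List.insertBy (fun a b => decide ((-((a.2.length : Int))) < (-((b.2.length : Int))))) x acc)
        acc xs) ≠ [] ∧
      (xs.foldl
        (fun (st : String × Int) kv =>
          if (kv.2.length : Int) > st.2 then (kv.1, (kv.2.length : Int)) else st) s).1
        = (List.foldl
            (fun acc x =>
              PySem.List.insertBy (fun a b => decide ((-((a.2.length : Int))) < (-((b.2.length : Int))))) x acc)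
            acc xs).headI.1 ∧
      (xs.foldl
        (fun (st : String × Int) kv =>
          if (kv.2.length : Int) > st.2 then (kv.1, (kv.2.length : Int)) else st) s).2
        = ((List.foldl
            (fun acc x =>
              PySem.List.insertBy (fun a b => decide ((-((a.2.length : Int))) < (-((b.2.length : Int))))) x acc)
            acc xs).headI.2.length : Int) := by
  induction xs with
  | nil => intro acc s hne h1 h2; exact ⟨hne, h1, h2⟩
  | cons x xs ih =>
    intro acc s hne h1 h2
    cases acc with
    | nil => exact absurd rfl hne
    | cons h t =>
      simp only [List.foldl_cons]
      by_cases hlt : (-((x.2.length : Int))) < (-((h.2.length : Int)))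
      · have hins : PySem.List.insertBy
            (fun a b => decide ((-((a.2.length : Int))) < (-((b.2.length : Int))))) x (h :: t)
            = x :: h :: t := by
          simp [PySem.List.insertBy, hlt]
        have hstep : (if (x.2.length : Int) >
            (s : String × Int).2 then (x.1, (x.2.length : Int)) else s) = (x.1, (x.2.length : Int)) := by
          rw [if_pos]
          simp only [h2, List.headI]
          omega
        rw [hins, hstep]
        exact ih (x :: h :: t) (x.1, (x.2.length : Int)) (by simp) rfl rfl
      · have hins : PySem.List.insertBy
            (fun a b => decide ((-((a.2.length : Int))) < (-((b.2.length : Int))))) x (h :: t)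
            = h :: PySem.List.insertBy
                (fun a b => decide ((-((a.2.length : Int))) < (-((b.2.length : Int))))) x t := by
          simp [PySem.List.insertBy, hlt]
        have hstep : (if (x.2.length : Int) >
            (s : String × Int).2 then (x.1, (x.2.length : Int)) else s) = s := by
          rw [if_neg]
          simp only [h2, List.headI]
          omega
        rw [hins, hstep]
        exact ih _ s (by simp) (by simpa using h1) (by simpa using h2)

-- ===== VERDICT (by name: the statement is the Claim_ definition above) =====
theorem most_courses_spec : Claim_equal_most_courses := by
  unfold Claim_equal_most_courses
  intro teacher _
  unfold Spec_most_courses most_courses most_courses_alt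
  cases teacher with
  | nil => simp
  | cons h t =>
    rw [if_neg (by simp)]
    rw [PySem.List.sorted_eq_foldl_insertBy]
    simp only [List.foldl_cons]
    have hinit : PySem.List.insertBy
        (fun a b => decide ((-((a.2.length : Int))) < (-((b.2.length : Int))))) h ([] : List (String × List String))
        = [h] := by simp [PySem.List.insertBy]
    have hfirst : (if (h.2.length : Int) > (-1 : Int) then (h.1, (h.2.length : Int)) else (("", -1) : String × Int))
        = (h.1, (h.2.length : Int)) := by rw [if_pos]; omega
    rw [hinit, hfirst]
    exact (pv_loop_inv t [h] (h.1, (h.2.length : Int)) (by simp) rfl rfl).2.1
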